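-- pv_equiv track=rewrite | github.com/abd1bayev/Python-and-Data-Science-through-the-Qwasar-platform | Data_Science_Qwasar_Platform/Exercises/hidenp.py | hidenp
-- ===== SOURCE A (Python) =====
-- def hidenp(param_1, param_2):
--     if len(param_1)==0:
--         return 1
--     res = []
--     for p1 in range(len(param_1)):
--         for p2 in range(len(param_2)):
--             if param_1[p1]==param_2[p2] and (param_1[p1]>='a' and param_1[p1]<='z'):
--                 res.append(p2)
--                 break
--     return int(res == sorted(res))
-- ===== SOURCE B (Python) =====
-- def hidenp(param_1, param_2):
--     # Two-pointer sweep: walk param_2 once with a cursor, remembering in `seen`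
--     # every character whose first occurrence the cursor has already passed.
--     # First-occurrence positions of the qualifying chars of param_1 are
--     # non-decreasing iff each new (different) char is found ahead of the
--     # cursor rather than in `seen`.
--     present = set(param_2)
--     need = [c for c in param_1 if 'a' <= c <= 'z' and c in present]
--     it = iter(param_2)
--     seen = set()
--     last = None
--     for c in need:
--         if c == last:
--             continue
--         if c in seen:
--             return 0
--         for d in it:
--             seen.add(d)
--             if d == c:
--                 break
--         last = c
--     return 1
-- ===== Notes on version B (the rewrite author's own statement) =====
-- stated objective: faster
-- what changed: Replaces A's per-character rescans of param_2 plus a final sort-compare by a single forward sweep of param_2 with one cursor and a 'seen' set: each new qualifying char must lie ahead of the cursor (found by advancing it once) and never in the already-passed region, so param_2 is traversed at most once in total.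
import Mathlib
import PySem

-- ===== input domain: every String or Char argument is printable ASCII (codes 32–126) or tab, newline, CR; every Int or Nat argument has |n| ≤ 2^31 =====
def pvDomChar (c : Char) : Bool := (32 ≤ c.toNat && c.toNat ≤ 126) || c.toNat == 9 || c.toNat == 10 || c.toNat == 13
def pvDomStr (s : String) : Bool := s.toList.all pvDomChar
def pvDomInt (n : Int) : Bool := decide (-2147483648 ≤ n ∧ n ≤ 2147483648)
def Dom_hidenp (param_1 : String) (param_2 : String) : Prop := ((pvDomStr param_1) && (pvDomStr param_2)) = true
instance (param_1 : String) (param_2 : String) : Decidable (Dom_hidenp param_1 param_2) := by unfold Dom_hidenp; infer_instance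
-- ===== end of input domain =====

-- B replaces A's per-char rescans of param_2 and final sort-compare by one forward sweep
-- of param_2 with a cursor and a seen-set (objective: faster).


-- ===== PORT A =====
-- inner 'for p2 in range(len(param_2)) … break' loop: scan param_2 carrying the index p2;
-- 'some p2' = the loop appended p2 and broke, 'none' = the loop ran out
def hidenpInner (c : Char) : List Char → Nat → Option Int
  | [], _ => none
  | c2 :: rest, p2 =>
    if c = c2 ∧ ('a' ≤ c ∧ c ≤ 'z') then some (p2 : Int)
    else hidenpInner c rest (p2 + 1)

-- outer 'for p1 in range(len(param_1))' loop building res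
def hidenpOuter (s2 : List Char) : List Char → List Int → List Int
  | [], res => res
  | c :: rest, res =>
    match hidenpInner c s2 0 with
    | some i => hidenpOuter s2 rest (res ++ [i])
    | none => hidenpOuter s2 rest res

def hidenp (param_1 : String) (param_2 : String) : Int :=
  if PySem.Str.len param_1 = 0 then 1
  else
    let res := hidenpOuter param_2.toList param_1.toList []
    if res = PySem.List.sorted res (fun x => x) false then 1 else 0

-- ===== PORT B =====
-- inner 'for d in it: seen.add(d); if d == c: break' — advances the shared iterator
def hidenpAdvance (c : Char) : List Char → PySem.Set Char → (List Char × PySem.Set Char)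
  | [], seen => ([], seen)
  | d :: rest, seen =>
    let seen' := PySem.Set.add seen d
    if d = c then (rest, seen') else hidenpAdvance c rest seen'

-- outer 'for c in need' loop: state = (iterator remainder, seen, last)
def hidenpSweep : List Char → List Char → PySem.Set Char → Option Char → Int
  | [], _, _, _ => 1
  | c :: need, it, seen, last =>
    if some c = last then hidenpSweep need it seen last
    else if PySem.Set.contains seen c then 0
    else
      match hidenpAdvance c it seen with
      | (it', seen') => hidenpSweep need it' seen' (some c)

def hidenp_alt (param_1 : String) (param_2 : String) : Int :=
  let present := PySem.Set.ofList param_2.toList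
  let need := param_1.toList.filter
    (fun c => decide ('a' ≤ c) && decide (c ≤ 'z') && PySem.Set.contains present c)
  hidenpSweep need param_2.toList PySem.Set.empty none

-- ===== PRECONDITION & SPEC =====
def Spec_hidenp (param_1 : String) (param_2 : String) (out : Int) : Prop := out = hidenp_alt param_1 param_2
instance (param_1 : String) (param_2 : String) (out : Int) : Decidable (Spec_hidenp param_1 param_2 out) := by unfold Spec_hidenp; infer_instance

-- ===== CLAIM (what is proved, stated in full; the proofs are below) =====
def Claim_equal_hidenp : Prop := ∀ (param_1 : String) (param_2 : String), Dom_hidenp param_1 param_2 → Spec_hidenp param_1 param_2 (hidenp param_1 param_2)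

-- ===== LEMMAS AND PROOFS =====

-- the first-occurrence position A's inner loop records for char c, if any
def posOf (s2 : List Char) (c : Char) : Option Int :=
  if 'a' ≤ c ∧ c ≤ 'z' then (PySem.List.index? s2 c).map (fun i => (i : Int)) else none

-- first-occurrence position as an Int, for chars known to occur in s2
def fpos (s2 : List Char) (c : Char) : Int :=
  (((PySem.List.index? s2 c).getD 0 : Nat) : Int)

lemma setContains_iff (s : PySem.Set Char) (c : Char) :
    PySem.Set.contains s c = true ↔ c ∈ s := by
  simp [PySem.Set.contains]

lemma hidenpInner_eq (c : Char) (s2 : List Char) (k : Nat) :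
    hidenpInner c s2 k = (posOf s2 c).map (fun i => i + (k : Int)) := by
  induction s2 generalizing k with
  | nil =>
    rw [hidenpInner, posOf]
    split <;> simp
  | cons c2 rest ih =>
    rw [hidenpInner]
    by_cases hcond : c = c2 ∧ ('a' ≤ c ∧ c ≤ 'z')
    · rw [if_pos hcond]
      obtain ⟨hc, hlc⟩ := hcond; subst hc
      rw [posOf, if_pos hlc, PySem.List.index?_cons_self]
      simp
    · rw [if_neg hcond, ih]
      by_cases hlc : 'a' ≤ c ∧ c ≤ 'z'
      · have hc : c2 ≠ c := fun h => hcond ⟨h.symm, hlc⟩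
        rw [posOf, posOf, if_pos hlc, if_pos hlc, PySem.List.index?_cons_of_ne rest hc]
        cases PySem.List.index? rest c with
        | none => rfl
        | some i => simp; ring
      · rw [posOf, posOf, if_neg hlc, if_neg hlc]; rfl

lemma hidenpOuter_eq (s2 : List Char) (s1 : List Char) (acc : List Int) :
    hidenpOuter s2 s1 acc = acc ++ s1.filterMap (posOf s2) := by
  induction s1 generalizing acc with
  | nil => simp [hidenpOuter]
  | cons c rest ih =>
    rw [hidenpOuter, hidenpInner_eq]
    cases h : posOf s2 c with
    | none => simp only [h, Option.map_none, List.filterMap_cons, ih]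
    | some i => simp only [h, Option.map_some, List.filterMap_cons, ih]; simp

lemma posOf_nonneg (s2 : List Char) (c : Char) (i : Int) (h : posOf s2 c = some i) : 0 ≤ i := by
  unfold posOf at h
  split at h
  · cases hj : PySem.List.index? s2 c with
    | none => rw [hj] at h; simp at h
    | some j => rw [hj] at h; simp at h; omega
  · simp at h

lemma filterMap_posOf_nonneg (s2 : List Char) (s1 : List Char) :
    ∀ i ∈ s1.filterMap (posOf s2), 0 ≤ i := by
  intro i hi
  rcases List.mem_filterMap.mp hi with ⟨c, _, hc⟩
  exact posOf_nonneg s2 c i hc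

-- res == sorted(res) is exactly Pairwise (≤)
lemma eq_sorted_iff_pairwise (res : List Int) :
    res = PySem.List.sorted res (fun x => x) false ↔ List.Pairwise (· ≤ ·) res := by
  constructor
  · intro h
    have hp := PySem.List.sorted_pairwise res (fun x => x)
    rw [← h] at hp
    exact hp
  · intro h
    exact PySem.List.eq_of_perm_of_pairwise_le_of_injective (fun x => x)
      (fun a b hab => hab) (PySem.List.sorted_perm res (fun x => x) false).symm h
      (PySem.List.sorted_pairwise res (fun x => x))

lemma isChain_neg_one_iff (L : List Int) (hL : ∀ i ∈ L, 0 ≤ i) :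
    List.IsChain (· ≤ ·) ((-1 : Int) :: L) ↔ List.Pairwise (· ≤ ·) L := by
  rw [← List.isChain_iff_pairwise]
  cases L with
  | nil => simp
  | cons x t =>
    rw [List.isChain_cons_cons]
    have hx : (-1 : Int) ≤ x := le_trans (by omega) (hL x (by simp))
    simp [hx]

-- A's res list is the fpos image of B's need list
lemma filterMap_posOf_eq_map_fpos (s2 : List Char) (l : List Char) :
    l.filterMap (posOf s2) =
      (l.filter (fun c => decide ('a' ≤ c) && decide (c ≤ 'z')
        && PySem.Set.contains (PySem.Set.ofList s2) c)).map (fpos s2) := by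
  induction l with
  | nil => simp
  | cons c rest ih =>
    rw [List.filterMap_cons, List.filter_cons]
    by_cases hlc : 'a' ≤ c ∧ c ≤ 'z'
    · by_cases hm : c ∈ s2
      · have hidx : ∃ i, PySem.List.index? s2 c = some i :=
          Option.isSome_iff_exists.mp ((PySem.List.index?_isSome_iff s2 c).mpr hm)
        obtain ⟨i, hi⟩ := hidx
        have hp : posOf s2 c = some (i : Int) := by rw [posOf, if_pos hlc, hi]; rfl
        rw [hp, if_pos (by simp [hlc.1, hlc.2, hm])]
        simp only [List.map_cons, ih]
        congr 1
        simp only [fpos, hi, Option.getD_some]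
      · have hp : posOf s2 c = none := by
          rw [posOf, if_pos hlc, (PySem.List.index?_eq_none_iff s2 c).mpr hm]; rfl
        rw [hp, if_neg (by simp [hm])]
        exact ih
    · have hp : posOf s2 c = none := by rw [posOf, if_neg hlc]
      rw [hp, if_neg (by simp; intro h1 h2; exact absurd ⟨h1, h2⟩ hlc)]
      exact ih

-- index? through an append when the element avoids the prefix
lemma index?_append_of_not_mem (pre suf : List Char) (c : Char) (h : c ∉ pre) :
    PySem.List.index? (pre ++ suf) c = (PySem.List.index? suf c).map (· + pre.length) := by
  induction pre with
  | nil => simp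
  | cons d rest ih =>
    have hd : d ≠ c := fun he => h (by simp [he])
    rw [List.cons_append, PySem.List.index?_cons_of_ne _ hd, ih (fun hm => h (by simp [hm]))]
    cases PySem.List.index? suf c with
    | none => rfl
    | some i => simp; omega

-- the advance loop splits the iterator at c's first occurrence and records what it passed
lemma hidenpAdvance_eq (c : Char) (suf : List Char) (seen : PySem.Set Char) (i : Nat)
    (h : PySem.List.index? suf c = some i) :
    hidenpAdvance c suf seen =
      (suf.drop (i + 1), PySem.Set.update seen (suf.take (i + 1))) := by
  induction suf generalizing seen i with
  | nil => simp [PySem.List.index?] at h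
  | cons d rest ih =>
    by_cases hd : d = c
    · subst hd
      rw [PySem.List.index?_cons_self] at h
      obtain rfl : i = 0 := by simpa using h.symm
      rw [hidenpAdvance, if_pos rfl]
      simp [PySem.Set.update]
    · rw [PySem.List.index?_cons_of_ne _ hd] at h
      cases hj : PySem.List.index? rest c with
      | none => rw [hj] at h; simp at h
      | some j =>
        rw [hj] at h
        obtain rfl : i = j + 1 := by simpa [hj] using h.symm
        rw [hidenpAdvance, if_neg hd, ih _ j hj]
        simp [PySem.Set.update]

lemma contains_update (seen : PySem.Set Char) (l : List Char) (c : Char) :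
    PySem.Set.contains (PySem.Set.update seen l) c = (PySem.Set.contains seen c || decide (c ∈ l)) := by
  induction l generalizing seen with
  | nil => simp [PySem.Set.update]
  | cons d rest ih =>
    rw [PySem.Set.update, List.foldl_cons, ← PySem.Set.update, ih]
    by_cases hd : c = d
    · subst hd
      simp [PySem.Set.mem_add]
    · simp [PySem.Set.mem_add, hd]

-- chars at a first-occurrence index are that char
lemma char_at_index? (s2 : List Char) (c : Char) (k : Nat) (h : PySem.List.index? s2 c = some k) :
    ∃ (hk : k < s2.length), s2[k] = c :=
  (PySem.List.getElem_of_index?_eq_some h).imp (fun _ hp => hp.1)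

-- main invariant of B's sweep: with s2 = pre ++ it, seen = chars of pre, and last
-- matched at position pre.length - 1, the sweep decides the monotone-chain condition
lemma hidenpSweep_eq (s2 : List Char) (need : List Char) (pre it : List Char)
    (seen : PySem.Set Char) (last : Option Char)
    (hsplit : s2 = pre ++ it)
    (hseen : ∀ c, PySem.Set.contains seen c = true ↔ c ∈ pre)
    (hlast : match last with
      | none => pre = []
      | some l => PySem.List.index? s2 l = some (pre.length - 1) ∧ pre ≠ [])
    (hneed : ∀ c ∈ need, c ∈ s2) :
    hidenpSweep need it seen last =
      if List.IsChain (· ≤ ·) (((pre.length : Int) - 1) :: need.map (fpos s2)) then 1 else 0 := by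
  induction need generalizing pre it seen last with
  | nil => simp [hidenpSweep]
  | cons c rest ih =>
    have hcs2 : c ∈ s2 := hneed c (by simp)
    obtain ⟨i, hi⟩ : ∃ i, PySem.List.index? s2 c = some i :=
      Option.isSome_iff_exists.mp ((PySem.List.index?_isSome_iff s2 c).mpr hcs2)
    have hfc : fpos s2 c = (i : Int) := by simp only [fpos, hi, Option.getD_some]
    rw [hidenpSweep]
    by_cases hlaste : some c = last
    · rw [if_pos hlaste]
      obtain ⟨hli, hpre⟩ : PySem.List.index? s2 c = some (pre.length - 1) ∧ pre ≠ [] := by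
        cases last with
        | none => simp at hlaste
        | some l =>
          have hcl : c = l := by simpa using hlaste
          subst hcl
          exact hlast
      have hieq : i = pre.length - 1 := by rw [hi] at hli; simpa using hli
      have hplen : 1 ≤ pre.length := by
        cases pre with
        | nil => exact absurd rfl hpre
        | cons _ _ => simp
      have hfc' : fpos s2 c = (pre.length : Int) - 1 := by rw [hfc, hieq]; omega
      rw [ih pre it seen last hsplit hseen hlast (fun x hx => hneed x (by simp [hx]))]
      rw [List.map_cons, hfc']
      by_cases hch : List.IsChain (· ≤ ·) (((pre.length : Int) - 1) :: rest.map (fpos s2))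
      · rw [if_pos hch, if_pos]
        cases hrm : rest.map (fpos s2) with
        | nil => simp
        | cons y t =>
          rw [hrm] at hch
          exact List.isChain_cons_cons.mpr ⟨le_refl _, hch⟩
      · rw [if_neg hch, if_neg]
        intro hc2
        exact hch (by
          cases hrm : rest.map (fpos s2) with
          | nil => simp
          | cons y t => rw [hrm] at hc2; exact (List.isChain_cons_cons.mp hc2).2)
    · rw [if_neg hlaste]
      by_cases hmem : PySem.Set.contains seen c = true
      · rw [if_pos hmem]
        have hcpre : c ∈ pre := (hseen c).mp hmem
        cases last with
        | none =>
          rw [hlast] at hcpre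
          simp at hcpre
        | some l =>
        obtain ⟨hlast', hpre⟩ := hlast
        have hipre : PySem.List.index? s2 c = PySem.List.index? pre c := by
          rw [hsplit]; exact PySem.List.index?_append_of_mem it hcpre
        obtain ⟨j, hj⟩ : ∃ j, PySem.List.index? pre c = some j :=
          Option.isSome_iff_exists.mp ((PySem.List.index?_isSome_iff pre c).mpr hcpre)
        have hij : i = j := by rw [hipre, hj] at hi; simpa using hi.symm
        have hjlt : j < pre.length := by
          obtain ⟨hk, _⟩ := char_at_index? pre c j hj
          exact hk
        -- i ≠ pre.length - 1, else c = l = last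
        have hne : i ≠ pre.length - 1 := by
          intro he
          subst he
          obtain ⟨hk1, hc1⟩ := char_at_index? s2 c _ hi
          obtain ⟨hk2, hc2⟩ := char_at_index? s2 l _ hlast'
          have hlc : c = l := by rw [← hc1, ← hc2]
          exact hlaste (by rw [hlc])
        have hplen : 1 ≤ pre.length := by
          cases pre with
          | nil => exact absurd rfl hpre
          | cons _ _ => simp
        rw [if_neg]
        rw [List.map_cons, hfc]
        intro hch
        have hle : (pre.length : Int) - 1 ≤ (i : Int) := (List.isChain_cons_cons.mp hch).1
        omega
      · rw [if_neg hmem]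
        have hcpre : c ∉ pre := fun h => hmem ((hseen c).mpr h)
        have hcit : c ∈ it := by
          rcases List.mem_append.mp (hsplit ▸ hcs2) with h | h
          · exact absurd h hcpre
          · exact h
        obtain ⟨k, hk⟩ : ∃ k, PySem.List.index? it c = some k :=
          Option.isSome_iff_exists.mp ((PySem.List.index?_isSome_iff it c).mpr hcit)
        have hik : i = k + pre.length := by
          have := index?_append_of_not_mem pre it c hcpre
          rw [← hsplit, hi, hk] at this
          simpa using this
        rw [hidenpAdvance_eq c it seen k hk]
        have hsplit' : s2 = (pre ++ it.take (k + 1)) ++ it.drop (k + 1) := by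
          rw [List.append_assoc, List.take_append_drop]; exact hsplit
        have hklt : k < it.length := (char_at_index? it c k hk).1
        have hlen' : (pre ++ it.take (k + 1)).length = pre.length + (k + 1) := by
          simp [List.length_take]
          omega
        show hidenpSweep rest (it.drop (k + 1)) (PySem.Set.update seen (it.take (k + 1))) (some c) = _
        rw [ih (pre ++ it.take (k + 1)) (it.drop (k + 1)) _ (some c) hsplit'
          (fun x => by
            rw [contains_update, Bool.or_eq_true, decide_eq_true_iff, hseen]
            simp [List.mem_append])
          (by
            refine ⟨?_, by apply List.ne_nil_of_length_pos; rw [hlen']; omega⟩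
            rw [hi, hlen']
            congr 1
            omega)
          (fun x hx => hneed x (by simp [hx]))]
        rw [hlen', List.map_cons, hfc]
        have hprev_le : (pre.length : Int) - 1 ≤ (i : Int) := by omega
        have hieq : ((pre.length + (k + 1) : Nat) : Int) - 1 = (i : Int) := by
          push_cast
          omega
        rw [hieq]
        by_cases hch : List.IsChain (· ≤ ·) ((i : Int) :: rest.map (fpos s2))
        · rw [if_pos hch, if_pos]
          cases hrm : rest.map (fpos s2) with
          | nil => simp [List.isChain_cons_cons, hprev_le]
          | cons y t =>
            rw [hrm] at hch
            exact List.isChain_cons_cons.mpr ⟨hprev_le, hch⟩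
        · rw [if_neg hch, if_neg]
          intro hc2
          exact hch (by
            cases hrm : rest.map (fpos s2) with
            | nil => simp
            | cons y t => rw [hrm] at hc2; exact (List.isChain_cons_cons.mp hc2).2)

-- ===== VERDICT (by name: the statement is the Claim_ definition above) =====
theorem hidenp_spec : Claim_equal_hidenp := by
  intro p1 p2 _
  unfold Spec_hidenp hidenp hidenp_alt
  have hneed : ∀ c ∈ p1.toList.filter
      (fun c => decide ('a' ≤ c) && decide (c ≤ 'z')
        && PySem.Set.contains (PySem.Set.ofList p2.toList) c), c ∈ p2.toList := by
    intro c hc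
    have h := List.of_mem_filter hc
    simp only [Bool.and_eq_true] at h
    exact (PySem.Set.mem_ofList p2.toList c).mp ((setContains_iff _ _).mp h.2)
  rw [hidenpSweep_eq p2.toList _ [] p2.toList PySem.Set.empty none rfl
    (by intro c; simp [PySem.Set.contains, PySem.Set.empty]) rfl hneed]
  simp only [hidenpOuter_eq, List.nil_append, List.length_nil, Nat.cast_zero, zero_sub]
  rw [filterMap_posOf_eq_map_fpos]
  have hnonneg : ∀ i ∈ (p1.toList.filter
      (fun c => decide ('a' ≤ c) && decide (c ≤ 'z')
        && PySem.Set.contains (PySem.Set.ofList p2.toList) c)).map (fpos p2.toList), 0 ≤ i := by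
    rw [← filterMap_posOf_eq_map_fpos]
    exact filterMap_posOf_nonneg p2.toList p1.toList
  have hiff := isChain_neg_one_iff _ hnonneg
  by_cases h0 : PySem.Str.len p1 = 0
  · have hnil : p1.toList = [] := by
      have hl := PySem.Str.len_eq p1
      rw [h0] at hl
      cases he : p1.toList with
      | nil => rfl
      | cons a t => rw [he] at hl; simp at hl; omega
    rw [hnil] at hiff ⊢
    simp only [List.filter_nil, List.map_nil] at hiff ⊢
    rw [if_pos h0, if_pos (hiff.mpr List.Pairwise.nil)]
  · rw [if_neg h0]
    by_cases hch : List.Pairwise (· ≤ ·)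
        ((p1.toList.filter (fun c => decide ('a' ≤ c) && decide (c ≤ 'z')
          && PySem.Set.contains (PySem.Set.ofList p2.toList) c)).map (fpos p2.toList))
    · rw [if_pos ((eq_sorted_iff_pairwise _).mpr hch), if_pos (hiff.mpr hch)]
    · rw [if_neg (fun h => hch ((eq_sorted_iff_pairwise _).mp h)),
          if_neg (fun h => hch (hiff.mp h))]
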